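-- pv_equiv track=rewrite | github.com/Koh-Du-Beom/python-codingTest | baekjoon/swTest1.py | BFS
-- ===== SOURCE A (Python) =====
-- from collections import deque
--
-- def BFS(N, M):
--   queue = deque()
--   queue.append((0, 0))
--
--   visited = set()
--   while queue:
--     position, moves = queue.popleft()
--
--     if position == M:
--       return moves
--
--     nexts = [position + 1, position + 6, position * 2]
--     for next in nexts:
--       if 0 <= next <= N and next not in visited:
--         visited.add(position)
--         queue.append((next, moves + 1))
--
--   return -1
-- ===== SOURCE B (Python) =====
-- def BFS(N, M):
--     # Shortest move count from 0 to M with moves +1, +6, *2 bounded by N.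
--     # Since every move increases the position, an optimal path to M never
--     # exceeds M, so for 0 <= M <= N the answer is a simple DP over 0..M.
--     if M == 0:
--         return 0
--     if M < 0 or M > N:
--         return -1
--     d = [0]
--     for i in range(1, M + 1):
--         best = d[i - 1]
--         if i >= 6 and d[i - 6] < best:
--             best = d[i - 6]
--         if i % 2 == 0 and d[i // 2] < best:
--             best = d[i // 2]
--         d.append(best + 1)
--     return d[M]
-- ===== Notes on version B (the rewrite author's own statement) =====
-- stated objective: faster
-- what changed: Replaces the FIFO queue/visited-set BFS by a dynamic program over 0..M: every move (+1, +6, *2) strictly increases a nonzero position, so for 0 <= M <= N the shortest path length is d[i] = 1 + min(d[i-1], d[i-6], d[i/2]) computed in one left-to-right pass, and out-of-range M is answered immediately with -1 instead of flooding the whole interval [0, N].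
import Mathlib
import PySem

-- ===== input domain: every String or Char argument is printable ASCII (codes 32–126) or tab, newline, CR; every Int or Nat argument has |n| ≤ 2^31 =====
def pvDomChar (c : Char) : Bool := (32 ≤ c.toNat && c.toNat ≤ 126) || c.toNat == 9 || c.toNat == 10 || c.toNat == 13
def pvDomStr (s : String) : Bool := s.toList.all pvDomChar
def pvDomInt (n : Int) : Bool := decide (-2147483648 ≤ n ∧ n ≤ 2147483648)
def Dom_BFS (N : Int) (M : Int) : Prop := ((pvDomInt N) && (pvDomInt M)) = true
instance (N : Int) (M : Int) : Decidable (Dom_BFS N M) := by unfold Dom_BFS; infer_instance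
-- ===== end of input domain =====

-- B replaces the per-node FIFO BFS by a closed-range dynamic program: every move
-- (+1, +6, *2) strictly increases a nonzero position, so for 0 <= M <= N the answer
-- is a DP over 0..M and otherwise -1; objective: faster when N is much larger than M.

-- ===== PORT A =====

def BFSstep (N : Int) (position : Int) (moves : Int)
    (st : PySem.Set Int × List (Int × Int)) (next : Int) :
    PySem.Set Int × List (Int × Int) :=
  if 0 ≤ next ∧ next ≤ N ∧ PySem.Set.contains st.1 next = false then
    (PySem.Set.add st.1 position, st.2 ++ [(next, moves + 1)])
  else st

theorem BFSfold_aux (N position moves : Int) (visited : PySem.Set Int) :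
    ∀ (ns : List Int) (b : Bool) (q : List (Int × Int)),
    ∃ new : List (Int × Int),
      ns.foldl (BFSstep N position moves) ((if b then PySem.Set.add visited position else visited), q)
        = ((if (b || !new.isEmpty) then PySem.Set.add visited position else visited), q ++ new) ∧
      (∀ e ∈ new, ∃ y, e = (y, moves + 1) ∧ y ∈ ns ∧ 0 ≤ y ∧ y ≤ N ∧ y ∉ visited) ∧
      (∀ y ∈ ns, 0 ≤ y → y ≤ N → y ∉ visited → y ≠ position → (y, moves + 1) ∈ new) ∧
      new.length ≤ ns.length := by
  intro ns
  induction ns with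
  | nil =>
    intro b q
    exact ⟨[], by simp, by simp, by simp, by simp⟩
  | cons x ns ih =>
    intro b q
    have hmemp : position ∈ PySem.Set.add visited position := by simp [PySem.Set.mem_add]
    by_cases hx : 0 ≤ x ∧ x ≤ N ∧ PySem.Set.contains (if b then PySem.Set.add visited position else visited) x = false
    · -- push fires
      have hxvp : x ∉ visited ∧ (b = true → x ≠ position) := by
        have h := hx.2.2
        cases b with
        | false =>
          simp only [Bool.false_eq_true, if_false] at h
          exact ⟨by simpa using h, by simp⟩
        | true =>
          simp only [if_true] at h
          have h2 : ¬ (x ∈ visited ∨ x = position) := by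
            simpa [PySem.Set.mem_add] using h
          exact ⟨fun hm => h2 (Or.inl hm), fun _ hp => h2 (Or.inr hp)⟩
      have hxv : x ∉ visited := hxvp.1
      have hstep : BFSstep N position moves ((if b then PySem.Set.add visited position else visited), q) x
          = ((if true then PySem.Set.add visited position else visited), q ++ [(x, moves + 1)]) := by
        cases b with
        | false =>
          simp only [Bool.false_eq_true, if_false, if_true] at hx ⊢
          simp only [BFSstep]
          rw [if_pos ⟨hx.1, hx.2.1, hx.2.2⟩]
        | true =>
          simp only [if_true] at hx ⊢
          simp only [BFSstep]
          rw [if_pos ⟨hx.1, hx.2.1, hx.2.2⟩, PySem.Set.add_of_mem hmemp]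
      obtain ⟨new, h1, h2, h3, h4⟩ := ih true (q ++ [(x, moves + 1)])
      refine ⟨(x, moves + 1) :: new, ?_, ?_, ?_, ?_⟩
      · simpa [hstep, List.append_assoc] using h1
      · rintro e he
        rcases List.mem_cons.1 he with rfl | he
        · exact ⟨x, rfl, by simp, hx.1, hx.2.1, hxv⟩
        · obtain ⟨y, rfl, hy1, hy2, hy3, hy4⟩ := h2 e he
          exact ⟨y, rfl, by simp [hy1], hy2, hy3, hy4⟩
      · intro y hy hy0 hyN hyv hyp
        rcases List.mem_cons.1 hy with rfl | hy
        · exact List.mem_cons_self ..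
        · exact List.mem_cons_of_mem _ (h3 y hy hy0 hyN hyv hyp)
      · simpa using Nat.succ_le_succ h4
    · -- no push
      have hstep : BFSstep N position moves ((if b then PySem.Set.add visited position else visited), q) x
          = ((if b then PySem.Set.add visited position else visited), q) := by
        simp only [BFSstep]
        rw [if_neg hx]
      obtain ⟨new, h1, h2, h3, h4⟩ := ih b q
      refine ⟨new, by simpa [hstep] using h1, ?_, ?_, by simpa using Nat.le_succ_of_le h4⟩
      · rintro e he
        obtain ⟨y, rfl, hy1, hy2, hy3, hy4⟩ := h2 e he
        exact ⟨y, rfl, by simp [hy1], hy2, hy3, hy4⟩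
      · intro y hy hy0 hyN hyv hyp
        rcases List.mem_cons.1 hy with rfl | hy
        · exfalso
          apply hx
          refine ⟨hy0, hyN, ?_⟩
          cases b with
          | false =>
            simp only [Bool.false_eq_true, if_false]
            simpa using hyv
          | true =>
            simp only [if_true]
            have : y ∉ PySem.Set.add visited position := by
              simp [PySem.Set.mem_add, hyv, hyp]
            simpa using this
        · exact h3 y hy hy0 hyN hyv hyp

theorem BFSfold_spec (N position moves : Int) (visited : PySem.Set Int)
    (q : List (Int × Int)) (ns : List Int) :
    ∃ new : List (Int × Int),
      ns.foldl (BFSstep N position moves) (visited, q)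
        = ((if new = [] then visited else PySem.Set.add visited position), q ++ new) ∧
      (∀ e ∈ new, ∃ y, e = (y, moves + 1) ∧ y ∈ ns ∧ 0 ≤ y ∧ y ≤ N ∧ y ∉ visited) ∧
      (∀ y ∈ ns, 0 ≤ y → y ≤ N → y ∉ visited → y ≠ position → (y, moves + 1) ∈ new) ∧
      new.length ≤ ns.length := by
  obtain ⟨new, h1, h2, h3, h4⟩ := BFSfold_aux N position moves visited ns false q
  refine ⟨new, ?_, h2, h3, h4⟩
  cases new with
  | nil => simpa using h1
  | cons e t => simpa using h1

def BFSunvis (N : Int) (visited : PySem.Set Int) : Nat :=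
  (PySem.List.pyRange 0 (N + 1) 1).countP (fun x => !visited.contains x)

def BFSphi (N : Int) (queue : List (Int × Int)) : Nat :=
  (queue.map (fun e => 4 ^ (N + 1 - e.1).toNat)).sum

theorem countP_lt_of_strict {α : Type} {l : List α} {p q : α → Bool}
    (hmono : ∀ x ∈ l, p x = true → q x = true) {x : α} (hx : x ∈ l)
    (hqx : q x = true) (hpx : p x = false) : l.countP p < l.countP q := by
  induction l with
  | nil => cases hx
  | cons a t ih =>
    rcases List.mem_cons.1 hx with rfl | hx
    · rw [List.countP_cons, List.countP_cons, hpx, hqx]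
      simp only [if_true, if_false, Bool.false_eq_true]
      have := List.countP_mono_left (l := t) (fun y hy => hmono y (List.mem_cons_of_mem _ hy))
      omega
    · have := ih (fun y hy => hmono y (List.mem_cons_of_mem _ hy)) hx
      rw [List.countP_cons, List.countP_cons]
      have h2 : (if p a then 1 else 0) ≤ (if q a then 1 else 0) := by
        by_cases h : p a = true
        · simp [h, hmono a (List.mem_cons_self ..) h]
        · simp only [Bool.not_eq_true] at h
          simp only [h, Bool.false_eq_true, if_false]
          omega
      split_ifs at h2 ⊢ <;> omega

theorem mem_intRange (N x : Int) :
    x ∈ PySem.List.pyRange 0 (N + 1) 1 ↔ 0 ≤ x ∧ x ≤ N := by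
  rw [PySem.List.mem_pyRange_one]
  omega

theorem BFSunvis_add_lt (N : Int) (visited : PySem.Set Int) (p : Int)
    (h0 : 0 ≤ p) (hN : p ≤ N) (hnv : p ∉ visited) :
    BFSunvis N (PySem.Set.add visited p) < BFSunvis N visited := by
  unfold BFSunvis
  apply countP_lt_of_strict (x := p)
  · intro x _ hx
    simp only [Bool.not_eq_eq_eq_not, Bool.not_true] at hx ⊢
    simp only [PySem.Set.contains_eq_listContains, List.contains_eq_mem,
      decide_eq_false_iff_not] at hx ⊢
    intro hmem
    exact hx (by simpa [PySem.Set.mem_add] using Or.inl hmem)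
  · exact (mem_intRange N p).2 ⟨h0, hN⟩

  · simp only [Bool.not_eq_eq_eq_not, Bool.not_true]
    simpa [PySem.Set.contains_eq_listContains, List.contains_eq_mem] using hnv
  · simp only [Bool.not_eq_eq_eq_not, Bool.not_false]
    have : p ∈ PySem.Set.add visited p := by simp [PySem.Set.mem_add]
    simpa [PySem.Set.contains_eq_listContains, List.contains_eq_mem] using this

theorem BFSunvis_add_eq (N : Int) (visited : PySem.Set Int) (p : Int)
    (h : p ∈ visited ∨ ¬ (0 ≤ p ∧ p ≤ N)) :
    BFSunvis N (PySem.Set.add visited p) = BFSunvis N visited := by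
  rcases h with h | h
  · rw [PySem.Set.add_of_mem h]
  · unfold BFSunvis
    apply List.countP_congr
    intro x hx
    have hxr : 0 ≤ x ∧ x ≤ N := (mem_intRange N x).1 hx
    have hxp : x ≠ p := by rintro rfl; exact h hxr
    simp only [Bool.not_eq_eq_eq_not, Bool.not_true, PySem.Set.contains_eq_listContains,
      List.contains_eq_mem, decide_eq_false_iff_not, PySem.Set.mem_add]
    constructor <;> intro hc
    · intro hm; exact hc (Or.inl hm)
    · rintro (hm | rfl)
      · exact hc hm
      · exact hxp rfl
theorem BFSmeasure_dec (N M position moves : Int) (visited : PySem.Set Int)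
    (rest : List (Int × Int)) :
    (Prod.Lex (· < ·) (· < ·))
      (BFSunvis N ([position+1, position+6, position*2].foldl (BFSstep N position moves) (visited, rest)).1,
       BFSphi N ([position+1, position+6, position*2].foldl (BFSstep N position moves) (visited, rest)).2)
      (BFSunvis N visited, BFSphi N ((position, moves) :: rest)) := by
  obtain ⟨new, heq, hnew, hcomp, hlen⟩ :=
    BFSfold_spec N position moves visited rest [position+1, position+6, position*2]
  rw [heq]
  by_cases hempty : new = []
  · subst hempty
    simp only [if_true, List.append_nil]
    apply Prod.Lex.right
    unfold BFSphi
    simp only [List.map_cons, List.sum_cons]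
    have : 0 < 4 ^ (N + 1 - position).toNat := Nat.pow_pos (by omega)
    omega
  · rw [if_neg hempty]
    by_cases hgood : 0 ≤ position ∧ position ≤ N ∧ position ∉ visited
    · exact Prod.Lex.left _ _ (BFSunvis_add_lt N visited position hgood.1 hgood.2.1 hgood.2.2)
    · -- card unchanged, phi decreases
      have hcard : BFSunvis N (PySem.Set.add visited position) = BFSunvis N visited := by
        apply BFSunvis_add_eq
        by_cases hv : position ∈ visited
        · exact Or.inl hv
        · right; intro hb; exact hgood ⟨hb.1, hb.2, hv⟩
      rw [hcard]
      apply Prod.Lex.right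
      -- every pushed y is > position and ≤ N
      have hygt : ∀ e ∈ new, position < e.1 ∧ e.1 ≤ N := by
        intro e he
        obtain ⟨y, rfl, hy1, hy2, hy3, hy4⟩ := hnew e he
        refine ⟨?_, hy3⟩
        simp only [List.mem_cons, List.mem_singleton, List.not_mem_nil, or_false] at hy1
        rcases hy1 with rfl | rfl | rfl
        · omega
        · omega
        · -- y = position * 2, 0 ≤ y: position ≥ 0; position = 0 would make y = 0 qualify hgood
          rcases lt_or_ge 0 position with hp | hp
          · omega
          · have hp0 : position = 0 := by omega
            exfalso
            exact hgood ⟨by omega, by omega, by simpa [hp0] using hy4⟩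
      unfold BFSphi
      rw [List.map_append, List.sum_append, List.map_cons, List.sum_cons]
      simp only
      have hbound : ∀ t ∈ new.map (fun e => 4 ^ (N + 1 - e.1).toNat),
          t ≤ 4 ^ ((N + 1 - position).toNat - 1) := by
        intro t ht
        obtain ⟨e, he, rfl⟩ := List.mem_map.1 ht
        obtain ⟨h1, h2⟩ := hygt e he
        exact Nat.pow_le_pow_right (by omega) (by omega)
      have hsum := List.sum_le_card_nsmul _ _ hbound
      rw [List.length_map] at hsum
      have hKpos : 1 ≤ (N + 1 - position).toNat := by
        obtain ⟨e, he⟩ := List.exists_mem_of_ne_nil new hempty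
        have := hygt e he
        omega
      have hlen3 : new.length ≤ 3 := by simpa using hlen
      have h4 : 4 ^ ((N + 1 - position).toNat - 1) * 4 = 4 ^ (N + 1 - position).toNat := by
        rw [← pow_succ]
        congr 1
        omega
      have hstrict : (new.map (fun e => 4 ^ (N + 1 - e.1).toNat)).sum
          < 4 ^ (N + 1 - position).toNat := by
        calc (new.map (fun e => 4 ^ (N + 1 - e.1).toNat)).sum
            ≤ new.length • (4 ^ ((N + 1 - position).toNat - 1)) := hsum
          _ ≤ 3 * (4 ^ ((N + 1 - position).toNat - 1)) := by
              simp only [smul_eq_mul]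
              exact Nat.mul_le_mul_right _ hlen3
          _ < 4 * (4 ^ ((N + 1 - position).toNat - 1)) := by
              have : 0 < 4 ^ ((N + 1 - position).toNat - 1) := Nat.pow_pos (by omega)
              omega
          _ = 4 ^ (N + 1 - position).toNat := by rw [← pow_succ']; congr 1; omega
      omega

-- A's while loop (queue, visited as Python's deque and set)
def BFSgo (N M : Int) (queue : List (Int × Int)) (visited : PySem.Set Int) : Int :=
  match queue with
  | [] => -1
  | (position, moves) :: rest =>
    if position = M then moves
    else
      BFSgo N M
        (([position + 1, position + 6, position * 2].foldl (BFSstep N position moves) (visited, rest)).2)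
        (([position + 1, position + 6, position * 2].foldl (BFSstep N position moves) (visited, rest)).1)
termination_by (BFSunvis N visited, BFSphi N queue)
decreasing_by
  exact BFSmeasure_dec N M position moves visited rest

def BFS (N : Int) (M : Int) : Int := BFSgo N M [(0, 0)] PySem.Set.empty

-- ===== PORT B =====

-- the body of B's 'for i in range(1, M+1)' loop (d = DP table so far)
def BFSdp (d : List Int) (i : Int) : List Int :=
  let best1 := PySem.List.pyGetD d (i - 1) 0
  let best2 := if 6 ≤ i ∧ PySem.List.pyGetD d (i - 6) 0 < best1
               then PySem.List.pyGetD d (i - 6) 0 else best1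
  let best3 := if PySem.Int.mod i 2 = 0 ∧ PySem.List.pyGetD d (PySem.Int.floordiv i 2) 0 < best2
               then PySem.List.pyGetD d (PySem.Int.floordiv i 2) 0 else best2
  d ++ [best3 + 1]

def BFS_alt (N : Int) (M : Int) : Int :=
  if M = 0 then 0
  else if M < 0 ∨ N < M then -1
  else
    PySem.List.pyGetD ((PySem.List.pyRange 1 (M + 1) 1).foldl BFSdp [0]) M 0

-- ===== PRECONDITION & SPEC =====
def Spec_BFS (N : Int) (M : Int) (out : Int) : Prop := out = BFS_alt N M
instance (N : Int) (M : Int) (out : Int) : Decidable (Spec_BFS N M out) := by unfold Spec_BFS; infer_instance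

-- ===== CLAIM (what is proved, stated in full; the proofs are below) =====
def Claim_equal_BFS : Prop := ∀ (N : Int) (M : Int), Dom_BFS N M → Spec_BFS N M (BFS N M)

-- ===== LEMMAS AND PROOFS =====

-- the shortest move count to reach position v (for 0 <= v <= bound this is the
-- graph distance; predecessors of v are v-1, v-6 and v/2, all below v)
def dN : Nat → Nat
  | 0 => 0
  | (v+1) =>
      let c1 := dN v
      let c2 := if 6 ≤ v + 1 then dN (v + 1 - 6) else c1
      let c3 := if (v + 1) % 2 = 0 then dN ((v + 1) / 2) else c1
      1 + min c1 (min c2 c3)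
decreasing_by
  · omega
  · omega
  · exact Nat.div_lt_self (by omega) (by omega)

-- 'position p is reachable from 0 in exactly m moves, all intermediate values in [0,N]'
inductive BFSreach (N : Int) : Int → Nat → Prop
  | zero : BFSreach N 0 0
  | succ {p y : Int} {m : Nat} :
      BFSreach N p m → (y = p + 1 ∨ y = p + 6 ∨ y = p * 2) → 0 ≤ y → y ≤ N →
      BFSreach N y (m + 1)

-- a single edge along which dN grows by exactly one (used for the optimal path to M)
def Rstep (u y : Int) : Prop :=
  0 ≤ u ∧ (y = u + 1 ∨ y = u + 6 ∨ y = u * 2) ∧ dN y.toNat = dN u.toNat + 1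

theorem dN_zero : dN 0 = 0 := by simp [dN]

theorem dN_succ (v : Nat) : dN (v + 1)
    = 1 + min (dN v) (min (if 6 ≤ v + 1 then dN (v + 1 - 6) else dN v)
                          (if (v + 1) % 2 = 0 then dN ((v + 1) / 2) else dN v)) := by
  rw [dN]

theorem dN_le_succ (v : Nat) : dN (v + 1) ≤ dN v + 1 := by
  rw [dN_succ]; omega

theorem dN_le_add6 (v : Nat) : dN (v + 6) ≤ dN v + 1 := by
  have h := dN_succ (v + 5)
  have h6 : 6 ≤ v + 5 + 1 := by omega
  rw [if_pos h6] at h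
  have h7 : v + 5 + 1 - 6 = v := by omega
  rw [h7] at h
  rw [show v + 5 + 1 = v + 6 from by omega] at h
  split_ifs at h <;> omega

theorem dN_le_double (v : Nat) (hv : 1 ≤ v) : dN (2 * v) ≤ dN v + 1 := by
  have h := dN_succ (2 * v - 1)
  have h1 : 2 * v - 1 + 1 = 2 * v := by omega
  rw [h1] at h
  have h2 : (2 * v) % 2 = 0 := by omega
  rw [if_pos h2] at h
  have h3 : 2 * v / 2 = v := by omega
  rw [h3] at h
  split_ifs at h <;> omega

theorem dN_succ_exists (v : Nat) :
    ∃ u : Nat, u ≤ v ∧ (v + 1 = u + 1 ∨ v + 1 = u + 6 ∨ v + 1 = 2 * u) ∧ dN (v + 1) = dN u + 1 := by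
  rw [dN_succ]
  by_cases h6 : 6 ≤ v + 1
  · by_cases h2 : (v + 1) % 2 = 0
    · rw [if_pos h6, if_pos h2]
      rcases Nat.le_total (dN v) (min (dN (v + 1 - 6)) (dN ((v + 1) / 2))) with h | h
      · exact ⟨v, le_refl v, Or.inl rfl, by omega⟩
      · rcases Nat.le_total (dN (v + 1 - 6)) (dN ((v + 1) / 2)) with h' | h'
        · exact ⟨v + 1 - 6, by omega, Or.inr (Or.inl (by omega)), by omega⟩
        · exact ⟨(v + 1) / 2, by omega, Or.inr (Or.inr (by omega)), by omega⟩
    · rw [if_pos h6, if_neg h2]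
      rcases Nat.le_total (dN v) (dN (v + 1 - 6)) with h | h
      · exact ⟨v, le_refl v, Or.inl rfl, by omega⟩
      · exact ⟨v + 1 - 6, by omega, Or.inr (Or.inl (by omega)), by omega⟩
  · by_cases h2 : (v + 1) % 2 = 0
    · rw [if_neg h6, if_pos h2]
      rcases Nat.le_total (dN v) (dN ((v + 1) / 2)) with h | h
      · exact ⟨v, le_refl v, Or.inl rfl, by omega⟩
      · exact ⟨(v + 1) / 2, by omega, Or.inr (Or.inr (by omega)), by omega⟩
    · rw [if_neg h6, if_neg h2]
      exact ⟨v, le_refl v, Or.inl rfl, by omega⟩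

theorem reach_nonneg {N p : Int} {m : Nat} (h : BFSreach N p m) : 0 ≤ p := by
  cases h with
  | zero => omega
  | succ _ _ h0 _ => exact h0

theorem reach_bound {N p : Int} {m : Nat} (h : BFSreach N p m) : p = 0 ∨ (0 ≤ p ∧ p ≤ N) := by
  cases h with
  | zero => exact Or.inl rfl
  | succ _ _ h0 hN => exact Or.inr ⟨h0, hN⟩

theorem reach_dN {N y : Int} {m : Nat} (h : BFSreach N y m) : dN y.toNat ≤ m := by
  induction h with
  | zero => simp [dN_zero]
  | @succ p y m hp hedge h0 hN ih =>
    have hp0 : 0 ≤ p := reach_nonneg hp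
    rcases hedge with rfl | rfl | rfl
    · have : (p + 1).toNat = p.toNat + 1 := by omega
      rw [this]
      have := dN_le_succ p.toNat
      omega
    · have : (p + 6).toNat = p.toNat + 6 := by omega
      rw [this]
      have := dN_le_add6 p.toNat
      omega
    · rcases eq_or_lt_of_le hp0 with h | h
      · have : (p * 2).toNat = 0 := by omega
        rw [this, dN_zero]; omega
      · have : (p * 2).toNat = 2 * p.toNat := by omega
        rw [this]
        have := dN_le_double p.toNat (by omega)
        omega

theorem rstep_lt {u y : Int} (h : Rstep u y) : u < y := by
  obtain ⟨h0, hedge, hdn⟩ := h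
  rcases hedge with rfl | rfl | rfl
  · omega
  · omega
  · rcases eq_or_lt_of_le h0 with h | h
    · exfalso
      rw [← h] at hdn
      simp [dN_zero] at hdn
    · omega

theorem chain_le {v w : Int} (h : Relation.ReflTransGen Rstep v w) : v ≤ w := by
  induction h with
  | refl => omega
  | tail _ hstep ih => have := rstep_lt hstep; omega

theorem chain_dN_le {v w : Int} (h : Relation.ReflTransGen Rstep v w) :
    dN v.toNat ≤ dN w.toNat := by
  induction h with
  | refl => exact le_refl _
  | tail _ hstep ih => obtain ⟨_, _, hdn⟩ := hstep; omega

theorem chain0 : ∀ v : Nat, Relation.ReflTransGen Rstep 0 (v : Int) := by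
  intro v
  induction v using Nat.strong_induction_on with
  | _ v ih =>
    match v with
    | 0 => exact Relation.ReflTransGen.refl
    | w + 1 =>
      obtain ⟨u, hu, hedge, hdn⟩ := dN_succ_exists w
      refine Relation.ReflTransGen.tail (ih u (by omega)) ?_
      refine ⟨by positivity, ?_, ?_⟩
      · rcases hedge with h | h | h
        · left; push_cast; omega
        · right; left; push_cast; omega
        · right; right; push_cast; omega
      · simp only [Int.toNat_natCast]
        omega

-- the loop invariant of A's BFS at level D: queue holds a level-D prefix then a
-- level-(D+1) suffix, every entry is genuinely reachable, every visited node has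
-- distance ≤ D, and some node on an optimal path to M is still in the queue
def BFSinv (N M : Int) (queue : List (Int × Int)) (visited : PySem.Set Int) (D : Nat) : Prop :=
  (∃ q1 q2, queue = q1 ++ q2 ∧ (∀ e ∈ q1, e.2 = (D : Int)) ∧ (∀ e ∈ q2, e.2 = (D : Int) + 1)) ∧
  (∀ e ∈ queue, ∃ k : Nat, e.2 = (k : Int) ∧ BFSreach N e.1 k) ∧
  (∀ v ∈ visited, dN v.toNat ≤ D) ∧
  (∃ (v : Int) (k : Nat), (v, (k : Int)) ∈ queue ∧ dN v.toNat = k ∧ 0 ≤ v ∧ Relation.ReflTransGen Rstep v M)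

theorem BFSinv_norm {N M : Int} {p m : Int} {rest : List (Int × Int)}
    {visited : PySem.Set Int} {D : Nat}
    (h : BFSinv N M ((p, m) :: rest) visited D) :
    ∃ D' : Nat, m = (D' : Int) ∧ BFSinv N M ((p, m) :: rest) visited D' ∧
      (∃ q1 q2, rest = q1 ++ q2 ∧ (∀ e ∈ q1, e.2 = (D' : Int)) ∧ (∀ e ∈ q2, e.2 = (D' : Int) + 1)) := by
  obtain ⟨⟨q1, q2, hq, h1, h2⟩, hreach, hvis, hwit⟩ := h
  cases q1 with
  | nil =>
    simp only [List.nil_append] at hq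
    subst hq
    have hm : m = (D : Int) + 1 := h2 (p, m) (by simp)
    refine ⟨D + 1, by push_cast; omega, ⟨⟨(p, m) :: rest, [], by simp, ?_, by simp⟩, hreach, ?_, hwit⟩,
      ⟨rest, [], by simp, ?_, by simp⟩⟩
    · intro e he
      have := h2 e he
      push_cast
      omega
    · intro v hv
      have := hvis v hv
      omega
    · intro e he
      have := h2 e (List.mem_cons_of_mem _ he)
      push_cast
      omega
  | cons a q1' =>
    simp only [List.cons_append, List.cons.injEq] at hq
    obtain ⟨rfl, hrest⟩ := hq
    refine ⟨D, ?_, ⟨⟨(p, m) :: q1', q2, by simp [hrest], h1, h2⟩, hreach, hvis, hwit⟩,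
      ⟨q1', q2, hrest, fun e he => h1 e (by simp [he]), h2⟩⟩
    exact h1 (p, m) (by simp)

theorem BFSgo_eq (N M : Int) (hM : 0 ≤ M) (hMN : M ≤ N) :
    ∀ (queue : List (Int × Int)) (visited : PySem.Set Int),
      (∃ D, BFSinv N M queue visited D) → BFSgo N M queue visited = ((dN M.toNat : Nat) : Int) := by
  intro queue visited
  induction queue, visited using BFSgo.induct N M with
  | case1 visited =>
    rintro ⟨D, _, _, _, v, k, hmem, _⟩
    simp at hmem
  | case2 visited moves rest =>
    rintro ⟨D0, hinv⟩
    obtain ⟨D, rfl, ⟨⟨q1, q2, hq, h1, h2⟩, hreach, hvis, v, k, hmem, hdv, hv0, hchain⟩, _⟩ :=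
      BFSinv_norm hinv
    rw [BFSgo.eq_def]
    simp only [↓reduceIte]
    -- the returned level D equals dN M.toNat
    obtain ⟨k', hk', hr⟩ := hreach (M, (D : Int)) (by simp)
    have hkD : k' = D := by
      have : ((D : Nat) : Int) = (k' : Int) := hk'
      exact_mod_cast this.symm
    subst hkD
    have hge : dN M.toNat ≤ k' := reach_dN hr
    -- witness gives the other direction
    have hkup : dN v.toNat ≤ dN M.toNat := chain_dN_le hchain
    have hklev : (k : Int) = (k' : Int) ∨ (k : Int) = (k' : Int) + 1 := by
      rcases List.mem_append.1 (hq ▸ hmem) with h | h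
      · exact Or.inl (h1 _ h)
      · exact Or.inr (h2 _ h)
    have hk'k : k' ≤ k := by omega
    omega
  | case3 visited position moves rest hne ih =>
    rintro ⟨D0, hinv⟩
    obtain ⟨D, rfl, ⟨⟨q1, q2, hq, h1, h2⟩, hreach, hvis, v, k, hmem, hdv, hv0, hchain⟩,
      q1', q2', hrest, hr1, hr2⟩ := BFSinv_norm hinv
    rw [BFSgo.eq_def]
    simp only [if_neg hne]
    obtain ⟨k0, hk0, hreachp⟩ := hreach (position, (D : Int)) (by simp)
    have hk0D : k0 = D := by
      have : ((D : Nat) : Int) = (k0 : Int) := hk0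
      exact_mod_cast this.symm
    subst hk0D
    obtain ⟨new, heq, hnew, hcomp, _⟩ :=
      BFSfold_spec N position ((k0 : Nat) : Int) visited rest
        [position + 1, position + 6, position * 2]
    apply ih
    rw [heq]
    refine ⟨k0, ?_, ?_, ?_, ?_⟩
    · -- level structure
      refine ⟨q1', q2' ++ new, by simp [hrest], hr1, ?_⟩
      intro e he
      rcases List.mem_append.1 he with h | h
      · exact hr2 e h
      · obtain ⟨y, rfl, _⟩ := hnew e h
        simp
    · -- reachability of every entry
      intro e he
      rcases List.mem_append.1 he with h | h
      · exact hreach e (by simp [h])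
      · obtain ⟨y, rfl, hy1, hy2, hy3, _⟩ := hnew e h
        refine ⟨k0 + 1, by push_cast; ring, ?_⟩
        refine BFSreach.succ hreachp ?_ hy2 hy3
        simpa using hy1
    · -- visited bound
      intro w hw
      by_cases hemp : new = []
      · rw [if_pos hemp] at hw
        exact hvis w hw
      · rw [if_neg hemp] at hw
        rcases (PySem.Set.mem_add visited position w).1 hw with hw' | rfl
        · exact hvis w hw'
        · exact reach_dN hreachp
    · -- the optimal-path witness survives
      by_cases hmem' : ((v, (k : Int)) ∈ rest)
      · exact ⟨v, k, by simp [hmem'], hdv, hv0, hchain⟩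
      · -- the popped entry was the witness: push its successor
        have hvp : v = position ∧ (k : Int) = (k0 : Int) := by
          rcases List.mem_cons.1 hmem with h | h
          · exact ⟨congrArg Prod.fst h, congrArg Prod.snd h⟩
          · exact absurd h hmem'
        obtain ⟨rfl, hkk⟩ := hvp
        have hkeq : k = k0 := by exact_mod_cast hkk
        rcases Relation.ReflTransGen.cases_head hchain with h | ⟨y, hstep, hchain'⟩
        · exact absurd h hne
        · obtain ⟨hp0, hedge, hdny⟩ := hstep
          have hlty : v < y := rstep_lt ⟨hp0, hedge, hdny⟩
          have hyM : y ≤ M := chain_le hchain'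
          have hynv : y ∉ visited := by
            intro hy
            have := hvis y hy
            omega
          have hpush := hcomp y (by simpa using hedge) (by omega) (by omega) hynv (by omega)
          refine ⟨y, k0 + 1, ?_, by omega, by omega, hchain'⟩
          show (y, ((k0 + 1 : Nat) : Int)) ∈ rest ++ new
          push_cast
          exact List.mem_append_right _ hpush

theorem BFSgo_none (N M : Int) (hM : M ≠ 0) (hout : M < 0 ∨ N < M) :
    ∀ (queue : List (Int × Int)) (visited : PySem.Set Int),
      (∀ e ∈ queue, ∃ k : Nat, BFSreach N e.1 k) → BFSgo N M queue visited = -1 := by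
  intro queue visited
  induction queue, visited using BFSgo.induct N M with
  | case1 visited =>
    intro _
    rw [BFSgo.eq_def]
  | case2 visited moves rest =>
    intro hreach
    obtain ⟨k, hr⟩ := hreach (M, moves) (by simp)
    rcases reach_bound hr with h | h
    · exact absurd h hM
    · simp only at h
      omega
  | case3 visited position moves rest hne ih =>
    intro hreach
    rw [BFSgo.eq_def]
    simp only [if_neg hne]
    obtain ⟨k, hreachp⟩ := hreach (position, moves) (by simp)
    obtain ⟨new, heq, hnew, _, _⟩ :=
      BFSfold_spec N position moves visited rest [position + 1, position + 6, position * 2]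
    apply ih
    rw [heq]
    intro e he
    rcases List.mem_append.1 he with h | h
    · exact hreach e (by simp [h])
    · obtain ⟨y, rfl, hy1, hy2, hy3, _⟩ := hnew e h
      exact ⟨k + 1, BFSreach.succ hreachp (by simpa using hy1) hy2 hy3⟩

theorem BFS_in_range (N M : Int) (hM : 0 ≤ M) (hMN : M ≤ N) :
    BFS N M = ((dN M.toNat : Nat) : Int) := by
  unfold BFS
  apply BFSgo_eq N M hM hMN
  refine ⟨0, ⟨[(0, 0)], [], by simp, by simp, by simp⟩, ?_, by simp [PySem.Set.empty], ?_⟩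
  · intro e he
    simp only [List.mem_singleton] at he
    subst he
    exact ⟨0, by simp, BFSreach.zero⟩
  · refine ⟨0, 0, by simp, by simp [dN_zero], le_refl 0, ?_⟩
    have := chain0 M.toNat
    rwa [Int.toNat_of_nonneg hM] at this

theorem BFS_out_range (N M : Int) (hM : M ≠ 0) (hout : M < 0 ∨ N < M) :
    BFS N M = -1 := by
  unfold BFS
  apply BFSgo_none N M hM hout
  intro e he
  simp only [List.mem_singleton] at he
  subst he
  exact ⟨0, BFSreach.zero⟩

-- ---- B side: the DP table computes dN ----

theorem pyGetD_dN (n j : Nat) (h : j < n + 1) :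
    PySem.List.pyGetD ((List.range (n + 1)).map (fun j => ((dN j : Nat) : Int))) ((j : Nat) : Int) 0
      = ((dN j : Nat) : Int) := by
  rw [PySem.List.pyGetD_natCast]
  rw [List.getD_eq_getElem _ _ (by simpa using h)]
  simp

theorem BFSdp_map (n : Nat) :
    BFSdp ((List.range (n + 1)).map (fun j => ((dN j : Nat) : Int))) ((n : Int) + 1)
      = (List.range (n + 1 + 1)).map (fun j => ((dN j : Nat) : Int)) := by
  simp only [BFSdp]
  have e1 : (n : Int) + 1 - 1 = ((n : Nat) : Int) := by omega
  rw [e1, pyGetD_dN n n (by omega)]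
  rw [List.range_succ (n := n + 1), List.map_append]
  congr 1
  simp only [List.map_cons, List.map_nil]
  congr 1
  by_cases h6 : 6 ≤ n + 1
  · have hc6 : (6 : Int) ≤ (n : Int) + 1 := by omega
    have e6 : (n : Int) + 1 - 6 = ((n - 5 : Nat) : Int) := by omega
    rw [e6, pyGetD_dN n (n - 5) (by omega)]
    have h56 : n + 1 - 6 = n - 5 := by omega
    by_cases h2 : (n + 1) % 2 = 0
    · have hm : PySem.Int.mod ((n : Int) + 1) 2 = 0 := by
        rw [PySem.Int.mod_eq_emod_of_pos (by omega)]; omega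
      have hd : PySem.Int.floordiv ((n : Int) + 1) 2 = (((n + 1) / 2 : Nat) : Int) := by
        rw [PySem.Int.floordiv_eq_ediv_of_pos (by omega)]; omega
      rw [hd, pyGetD_dN n ((n + 1) / 2) (by omega)]
      rw [dN_succ, if_pos h6, if_pos h2, h56]
      simp only [hm, and_true, true_and, hc6]
      push_cast [Nat.cast_min]
      split_ifs <;> omega
    · have hm : ¬ (PySem.Int.mod ((n : Int) + 1) 2 = 0) := by
        rw [PySem.Int.mod_eq_emod_of_pos (by omega)]; omega
      rw [dN_succ, if_pos h6, if_neg h2, h56]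
      simp only [hm, false_and, if_false, hc6, true_and]
      push_cast [Nat.cast_min]
      split_ifs <;> omega
  · have hc6 : ¬ ((6 : Int) ≤ (n : Int) + 1) := by omega
    by_cases h2 : (n + 1) % 2 = 0
    · have hm : PySem.Int.mod ((n : Int) + 1) 2 = 0 := by
        rw [PySem.Int.mod_eq_emod_of_pos (by omega)]; omega
      have hd : PySem.Int.floordiv ((n : Int) + 1) 2 = (((n + 1) / 2 : Nat) : Int) := by
        rw [PySem.Int.floordiv_eq_ediv_of_pos (by omega)]; omega
      rw [hd, pyGetD_dN n ((n + 1) / 2) (by omega)]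
      rw [dN_succ, if_neg h6, if_pos h2]
      simp only [hm, and_true, true_and, hc6, false_and, if_false]
      push_cast [Nat.cast_min]
      split_ifs <;> omega
    · have hm : ¬ (PySem.Int.mod ((n : Int) + 1) 2 = 0) := by
        rw [PySem.Int.mod_eq_emod_of_pos (by omega)]; omega
      rw [dN_succ, if_neg h6, if_neg h2]
      simp only [hm, false_and, if_false, hc6]
      push_cast [Nat.cast_min]
      omega

theorem BFSdp_inv : ∀ n : Nat,
    (PySem.List.pyRange 1 ((n : Int) + 1) 1).foldl BFSdp [0]
      = (List.range (n + 1)).map (fun j => ((dN j : Nat) : Int)) := by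
  intro n
  induction n with
  | zero =>
    rw [PySem.List.pyRange_one_eq_nil (by omega)]
    simp [dN_zero]
  | succ n ih =>
    have hc : ((n + 1 : Nat) : Int) + 1 = ((n : Int) + 1) + 1 := by push_cast; ring
    rw [hc, PySem.List.pyRange_one_succ_right (by omega), List.foldl_append, ih]
    simp only [List.foldl_cons, List.foldl_nil]
    exact BFSdp_map n

theorem BFS_alt_in_range (N M : Int) (hM0 : ¬ M = 0) (hM : 0 ≤ M) (hMN : M ≤ N) :
    BFS_alt N M = ((dN M.toNat : Nat) : Int) := by
  unfold BFS_alt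
  rw [if_neg hM0, if_neg (by omega)]
  have hMc : M = ((M.toNat : Nat) : Int) := by omega
  rw [hMc, BFSdp_inv M.toNat, pyGetD_dN M.toNat M.toNat (by omega)]
  congr 2


theorem BFS_spec : Claim_equal_BFS := by
  unfold Claim_equal_BFS
  intro N M _
  unfold Spec_BFS
  by_cases hM0 : M = 0
  · subst hM0
    have hA : BFS N 0 = 0 := by
      unfold BFS
      rw [BFSgo.eq_def]
      simp
    rw [hA]
    unfold BFS_alt
    simp
  · by_cases hout : M < 0 ∨ N < M
    · rw [BFS_out_range N M hM0 hout]
      unfold BFS_alt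
      rw [if_neg hM0, if_pos hout]
    · push_neg at hout
      rw [BFS_in_range N M (by omega) (by omega),
        BFS_alt_in_range N M hM0 (by omega) (by omega)]
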